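-- pv_equiv track=rewrite | github.com/tecnovert/xmrswap | xmrswap/util.py | decodeScriptNum
-- ===== SOURCE A (Python) =====
-- OP_1 = 0x51
--
-- OP_16 = 0x60
--
-- def decodeScriptNum(script_bytes, o):
--     v = 0
--     num_len = script_bytes[o]
--     if num_len >= OP_1 and num_len <= OP_16:
--         return((num_len - OP_1) + 1, 1)
--
--     if num_len > 4:
--         raise ValueError('Bad scriptnum length')  # Max 4 bytes
--     if num_len + o >= len(script_bytes):
--         raise ValueError('Bad script length')
--     o += 1
--     for i in range(num_len):
--         b = script_bytes[o + i]
--         # Negative flag set in last byte, if num is positive and > 0x80 an extra 0x00 byte will be appended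
--         if i == num_len - 1 and b & 0x80:
--             b &= (~(0x80) & 0xFF)
--             v += int(b) << 8 * i
--             v *= -1
--         else:
--             v += int(b) << 8 * i
--     return(v, 1 + num_len)
-- ===== SOURCE B (Python) =====
-- OP_1 = 0x51
--
-- OP_16 = 0x60
--
--
-- def _le(script_bytes, p, n):
--     # little-endian value of the n bytes starting at index p, by structural recursion
--     if n == 0:
--         return 0
--     return script_bytes[p] + 256 * _le(script_bytes, p + 1, n - 1)
--
--
-- def decodeScriptNum(script_bytes, o):
--     num_len = script_bytes[o]
--     if OP_1 <= num_len <= OP_16: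
--         return (num_len - OP_1 + 1, 1)
--     if num_len > 4:
--         raise ValueError('Bad scriptnum length')  # Max 4 bytes
--     if num_len + o >= len(script_bytes):
--         raise ValueError('Bad script length')
--     if num_len <= 0:
--         return (0, 1 + num_len)
--     top = script_bytes[o + num_len]
--     if top & 0x80:
--         # negative flag: magnitude = lower bytes plus the top byte without its sign bit
--         return (-(_le(script_bytes, o + 1, num_len - 1) + (top & 0x7F) * 256 ** (num_len - 1)), 1 + num_len)
--     return (_le(script_bytes, o + 1, num_len), 1 + num_len)
-- ===== Notes on version B (the rewrite author's own statement) =====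
-- stated objective: alternative
-- what changed: B replaces A's indexed accumulation loop with in-line per-iteration sign special-casing by a structural recursion: a recursive helper computes the little-endian value of the lower bytes (v = byte + 256 * rest), while the top byte is fetched once and the sign flag is detected and applied in a separate step outside the recursion.
import Mathlib
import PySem

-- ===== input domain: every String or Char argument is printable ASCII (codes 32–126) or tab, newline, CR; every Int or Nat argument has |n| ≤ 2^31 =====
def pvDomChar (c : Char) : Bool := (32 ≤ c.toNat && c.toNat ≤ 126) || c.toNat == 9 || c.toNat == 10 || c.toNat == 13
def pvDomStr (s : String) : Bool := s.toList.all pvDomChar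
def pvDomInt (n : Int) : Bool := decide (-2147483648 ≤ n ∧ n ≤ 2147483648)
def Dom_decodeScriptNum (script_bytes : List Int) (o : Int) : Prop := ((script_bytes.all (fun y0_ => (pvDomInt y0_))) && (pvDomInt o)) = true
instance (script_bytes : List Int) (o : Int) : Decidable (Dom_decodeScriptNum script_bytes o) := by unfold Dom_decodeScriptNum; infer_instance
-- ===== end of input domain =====

set_option maxHeartbeats 2000000


-- B replaces A's indexed loop with in-line sign special-casing by structural recursion:
-- a recursive little-endian helper over the lower bytes, with the top byte and the sign
-- handled once, outside the recursion ('alternative' decomposition, same cost).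

-- ===== PORT A =====
def decodeScriptNum (script_bytes : List Int) (o : Int) : Int × Int :=
  let v : Int := 0
  let num_len := (PySem.List.pyGet? script_bytes o).getD 0   -- none = IndexError, excluded by Pre_
  if 0x51 ≤ num_len ∧ num_len ≤ 0x60 then ((num_len - 0x51) + 1, 1)
  else if num_len > 4 then (0, 0)                            -- raise ValueError, excluded by Pre_
  else if num_len + o ≥ (script_bytes.length : Int) then (0, 0)   -- raise ValueError, excluded by Pre_
  else
    let o := o + 1
    let v := (PySem.List.pyRange 0 num_len 1).foldl (fun v i =>
      let b := PySem.List.pyGetD script_bytes (o + i) 0      -- in range whenever A's guards passed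
      if i = num_len - 1 ∧ PySem.Int.band b 0x80 ≠ 0 then
        let b := PySem.Int.band b (PySem.Int.band (Int.not 0x80) 0xFF)
        let v := v + b <<< (8 * i).toNat
        v * (-1)
      else v + b <<< (8 * i).toNat) v
    (v, 1 + num_len)

-- ===== PORT B =====
-- B's helper _le recurses on the count n (B only calls it with n ≥ 0, so the Nat count is exact)
def leAcc (script_bytes : List Int) (p : Int) : Nat → Int
  | 0 => 0
  | n + 1 => PySem.List.pyGetD script_bytes p 0 + 256 * leAcc script_bytes (p + 1) n

def decodeScriptNum_alt (script_bytes : List Int) (o : Int) : Int × Int :=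
  let num_len := (PySem.List.pyGet? script_bytes o).getD 0   -- none = IndexError, excluded by Pre_
  if 0x51 ≤ num_len ∧ num_len ≤ 0x60 then (num_len - 0x51 + 1, 1)
  else if num_len > 4 then (0, 0)                            -- raise ValueError, excluded by Pre_
  else if num_len + o ≥ (script_bytes.length : Int) then (0, 0)   -- raise ValueError, excluded by Pre_
  else if num_len ≤ 0 then (0, 1 + num_len)
  else
    let top := PySem.List.pyGetD script_bytes (o + num_len) 0
    if PySem.Int.band top 0x80 ≠ 0 then
      (-(leAcc script_bytes (o + 1) (num_len - 1).toNat
          + PySem.Int.band top 0x7F * 256 ^ (num_len - 1).toNat), 1 + num_len)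
    else (leAcc script_bytes (o + 1) num_len.toNat, 1 + num_len)

-- ===== PRECONDITION & SPEC =====
-- Pre_ excludes exactly the inputs on which A raises: offset out of range (IndexError) and the
-- two explicit ValueError guards (num_len > 4, or num_len + o ≥ len outside the OP_1..OP_16 case).
def Pre_decodeScriptNum (script_bytes : List Int) (o : Int) : Prop :=
  PySem.Raise.InRange script_bytes.length o ∧
  ((0x51 ≤ (PySem.List.pyGet? script_bytes o).getD 0 ∧ (PySem.List.pyGet? script_bytes o).getD 0 ≤ 0x60) ∨
   ((PySem.List.pyGet? script_bytes o).getD 0 ≤ 4 ∧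
    (PySem.List.pyGet? script_bytes o).getD 0 + o < (script_bytes.length : Int)))
instance (script_bytes : List Int) (o : Int) : Decidable (Pre_decodeScriptNum script_bytes o) := by
  unfold Pre_decodeScriptNum; infer_instance

def pvWitness_decodeScriptNum : List Int × Int := ([2, 0x85, 0x81], 0)

def Spec_decodeScriptNum (script_bytes : List Int) (o : Int) (out : Int × Int) : Prop := out = decodeScriptNum_alt script_bytes o
instance (script_bytes : List Int) (o : Int) (out : Int × Int) : Decidable (Spec_decodeScriptNum script_bytes o out) := by unfold Spec_decodeScriptNum; infer_instance

-- ===== CLAIM (what is proved, stated in full; the proofs are below) =====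
def Claim_equal_decodeScriptNum : Prop := ∀ (script_bytes : List Int) (o : Int), Dom_decodeScriptNum script_bytes o → Pre_decodeScriptNum script_bytes o → Spec_decodeScriptNum script_bytes o (decodeScriptNum script_bytes o)

-- ===== LEMMAS AND PROOFS =====
theorem leAcc_zero (sb : List Int) (p : Int) : leAcc sb p 0 = 0 := rfl
theorem leAcc_one (sb : List Int) (p : Int) : leAcc sb p 1 = PySem.List.pyGetD sb p 0 := by
  rw [show leAcc sb p 1 = PySem.List.pyGetD sb p 0 + 256 * 0 from rfl]; ring
theorem leAcc_two (sb : List Int) (p : Int) :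
    leAcc sb p 2 = PySem.List.pyGetD sb p 0 + 256 * PySem.List.pyGetD sb (p + 1) 0 := by
  rw [show leAcc sb p 2 = PySem.List.pyGetD sb p 0
    + 256 * (PySem.List.pyGetD sb (p + 1) 0 + 256 * 0) from rfl]; ring
theorem leAcc_three (sb : List Int) (p : Int) :
    leAcc sb p 3 = PySem.List.pyGetD sb p 0 + 256 * PySem.List.pyGetD sb (p + 1) 0
      + 65536 * PySem.List.pyGetD sb (p + 1 + 1) 0 := by
  rw [show leAcc sb p 3 = PySem.List.pyGetD sb p 0 + 256 * (PySem.List.pyGetD sb (p + 1) 0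
    + 256 * (PySem.List.pyGetD sb (p + 1 + 1) 0 + 256 * 0)) from rfl]; ring
theorem leAcc_four (sb : List Int) (p : Int) :
    leAcc sb p 4 = PySem.List.pyGetD sb p 0 + 256 * PySem.List.pyGetD sb (p + 1) 0
      + 65536 * PySem.List.pyGetD sb (p + 1 + 1) 0
      + 16777216 * PySem.List.pyGetD sb (p + 1 + 1 + 1) 0 := by
  rw [show leAcc sb p 4 = PySem.List.pyGetD sb p 0 + 256 * (PySem.List.pyGetD sb (p + 1) 0
    + 256 * (PySem.List.pyGetD sb (p + 1 + 1) 0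
    + 256 * (PySem.List.pyGetD sb (p + 1 + 1 + 1) 0 + 256 * 0))) from rfl]; ring
theorem ports_eq (script_bytes : List Int) (o : Int) :
    decodeScriptNum script_bytes o = decodeScriptNum_alt script_bytes o := by
  unfold decodeScriptNum decodeScriptNum_alt
  generalize (PySem.List.pyGet? script_bytes o).getD 0 = n
  by_cases h1 : 0x51 ≤ n ∧ n ≤ 0x60
  · simp [h1]
  by_cases h2 : n > 4
  · simp [h1, h2]
  by_cases h3 : n + o ≥ (script_bytes.length : Int)
  · simp [h1, h2, h3]
  simp only [if_neg h1, if_neg h2, if_neg h3]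
  by_cases h0 : n ≤ 0
  · rw [PySem.List.pyRange_one_eq_nil h0]
    simp [h0]
  · have h0 : 0 < n := lt_of_not_ge h0
    have h4 : n ≤ 4 := le_of_not_gt h2
    simp only [if_neg (not_le.mpr h0)]
    interval_cases n
    · rw [show PySem.List.pyRange 0 1 1 = [(0:Int)] from by decide]
      simp only [List.foldl_cons, List.foldl_nil]
      norm_num [leAcc_zero, leAcc_one, leAcc_two, leAcc_three, leAcc_four, Int.shiftLeft_eq,
        show Int.toNat 2 = 2 from rfl, show Int.toNat 3 = 3 from rfl, show Int.toNat 4 = 4 from rfl,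
        show Int.toNat 8 = 8 from rfl, show Int.toNat 16 = 16 from rfl, show Int.toNat 24 = 24 from rfl,
        show PySem.Int.band (Int.not 0x80) 0xFF = 0x7F from by decide]
      ring_nf
      split_ifs <;> try ring_nf
    · rw [show PySem.List.pyRange 0 2 1 = [(0:Int), 1] from by decide]
      simp only [List.foldl_cons, List.foldl_nil]
      norm_num [leAcc_zero, leAcc_one, leAcc_two, leAcc_three, leAcc_four, Int.shiftLeft_eq,
        show Int.toNat 2 = 2 from rfl, show Int.toNat 3 = 3 from rfl, show Int.toNat 4 = 4 from rfl,
        show Int.toNat 8 = 8 from rfl, show Int.toNat 16 = 16 from rfl, show Int.toNat 24 = 24 from rfl,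
        show PySem.Int.band (Int.not 0x80) 0xFF = 0x7F from by decide]
      ring_nf
      split_ifs <;> try ring_nf
    · rw [show PySem.List.pyRange 0 3 1 = [(0:Int), 1, 2] from by decide]
      simp only [List.foldl_cons, List.foldl_nil]
      norm_num [leAcc_zero, leAcc_one, leAcc_two, leAcc_three, leAcc_four, Int.shiftLeft_eq,
        show Int.toNat 2 = 2 from rfl, show Int.toNat 3 = 3 from rfl, show Int.toNat 4 = 4 from rfl,
        show Int.toNat 8 = 8 from rfl, show Int.toNat 16 = 16 from rfl, show Int.toNat 24 = 24 from rfl,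
        show PySem.Int.band (Int.not 0x80) 0xFF = 0x7F from by decide]
      ring_nf
      split_ifs <;> try ring_nf
    · rw [show PySem.List.pyRange 0 4 1 = [(0:Int), 1, 2, 3] from by decide]
      simp only [List.foldl_cons, List.foldl_nil]
      norm_num [leAcc_zero, leAcc_one, leAcc_two, leAcc_three, leAcc_four, Int.shiftLeft_eq,
        show Int.toNat 2 = 2 from rfl, show Int.toNat 3 = 3 from rfl, show Int.toNat 4 = 4 from rfl,
        show Int.toNat 8 = 8 from rfl, show Int.toNat 16 = 16 from rfl, show Int.toNat 24 = 24 from rfl,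
        show PySem.Int.band (Int.not 0x80) 0xFF = 0x7F from by decide]
      ring_nf
      split_ifs <;> try ring_nf

-- ===== VERDICT (by name: the statement is the Claim_ definition above) =====
theorem decodeScriptNum_spec : Claim_equal_decodeScriptNum := by
  intro script_bytes o _ _
  unfold Spec_decodeScriptNum
  exact ports_eq script_bytes o
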